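-- pv_equiv track=rewrite | github.com/ramjal/python-sandbox | think_python/chapter_12/Exercise12.3.py | is_metathesis
-- ===== SOURCE A (Python) =====
-- def is_metathesis(w1, w2):
--     l1 = list(w1)
--     l2 = list(w2)
--     for i in range(0, len(w1)):
--         for j in range(i+1, len(w1)):
--             lswap = l1.copy()
--             lswap[i], lswap[j] = lswap[j], lswap[i]
--             if lswap == l2:
--                 return True
--     return False
-- ===== SOURCE B (Python) =====
-- def is_metathesis(w1, w2):
--     n = len(w1)
--     if n != len(w2) or n < 2:
--         return False
--     diffs = [i for i in range(n) if w1[i] != w2[i]]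
--     if not diffs:
--         # w1 == w2: some swap of two equal letters works iff w1 has a repeated letter
--         return len(set(w1)) < n
--     if len(diffs) == 2:
--         i, j = diffs
--         return w1[i] == w2[j] and w1[j] == w2[i]
--     return False
-- ===== Notes on version B (the rewrite author's own statement) =====
-- stated objective: faster
-- what changed: Replaces the brute-force enumeration of all O(n^2) index pairs with an O(n^2) list comparison each by a single pass collecting the differing positions, then checking the exactly-two-swap condition or, when the words are equal, a duplicate letter via a set.
import Mathlib
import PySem

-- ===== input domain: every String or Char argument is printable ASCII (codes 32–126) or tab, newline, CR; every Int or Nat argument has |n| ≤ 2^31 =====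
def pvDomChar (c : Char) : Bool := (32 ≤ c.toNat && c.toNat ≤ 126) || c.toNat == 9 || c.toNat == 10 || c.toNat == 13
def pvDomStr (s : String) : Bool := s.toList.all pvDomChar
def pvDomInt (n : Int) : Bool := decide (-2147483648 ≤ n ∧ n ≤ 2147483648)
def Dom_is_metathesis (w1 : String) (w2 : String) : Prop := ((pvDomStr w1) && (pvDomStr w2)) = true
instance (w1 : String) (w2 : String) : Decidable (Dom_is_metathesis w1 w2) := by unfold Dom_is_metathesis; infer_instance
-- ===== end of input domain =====

-- B replaces A's brute-force trial of every index pair by one pass collecting the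
-- differing positions; objective: faster.

-- ===== PORT A =====
-- the fresh copy l1.copy() with the simultaneous swap lswap[i], lswap[j] = lswap[j], lswap[i]
def pvSwap (l : List Char) (i j : Nat) : List Char :=
  (l.set i (l.getD j ' ')).set j (l.getD i ' ')

def is_metathesis (w1 : String) (w2 : String) : Bool :=
  let l1 := w1.toList
  let l2 := w2.toList
  (List.range w1.toList.length).any fun i =>
    (List.range' (i + 1) (w1.toList.length - (i + 1))).any fun j =>
      pvSwap l1 i j == l2

-- ===== PORT B =====
def is_metathesis_alt (w1 : String) (w2 : String) : Bool :=
  let a := w1.toList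
  let b := w2.toList
  let n := a.length
  if n != b.length || decide (n < 2) then false
  else
    match (List.range n).filter (fun i => a.getD i ' ' != b.getD i ' ') with
    | [] => decide ((PySem.Set.ofList a).length < n)
    | [i, j] => a.getD i ' ' == b.getD j ' ' && a.getD j ' ' == b.getD i ' '
    | _ => false

-- ===== PRECONDITION & SPEC =====
def Spec_is_metathesis (w1 : String) (w2 : String) (out : Bool) : Prop := out = is_metathesis_alt w1 w2
instance (w1 : String) (w2 : String) (out : Bool) : Decidable (Spec_is_metathesis w1 w2 out) := by unfold Spec_is_metathesis; infer_instance

-- ===== CLAIM (what is proved, stated in full; the proofs are below) =====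
def Claim_equal_is_metathesis : Prop := ∀ (w1 : String) (w2 : String), Dom_is_metathesis w1 w2 → Spec_is_metathesis w1 w2 (is_metathesis w1 w2)

-- ===== LEMMAS AND PROOFS =====

theorem getD_pvSwap (a : List Char) (i j k : Nat) (hk : k < a.length) :
    (pvSwap a i j).getD k ' ' =
      if k = j then a.getD i ' ' else if k = i then a.getD j ' ' else a.getD k ' ' := by
  have hk' : k < ((a.set i (a.getD j ' ')).set j (a.getD i ' ')).length := by simpa using hk
  rw [pvSwap, List.getD_eq_getElem _ _ hk', List.getElem_set, List.getElem_set,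
      List.getD_eq_getElem _ _ hk]
  by_cases h1 : k = j
  · rw [if_pos h1.symm, if_pos h1]
  · rw [if_neg (fun h => h1 h.symm), if_neg h1]
    by_cases h2 : k = i
    · rw [if_pos h2.symm, if_pos h2]
    · rw [if_neg (fun h => h2 h.symm), if_neg h2]

theorem length_pvSwap (a : List Char) (i j : Nat) : (pvSwap a i j).length = a.length := by
  simp [pvSwap]

theorem pvSwap_eq_iff (a b : List Char) (i j : Nat) (hij : i < j) (hj : j < a.length) :
    pvSwap a i j = b ↔
      b.length = a.length ∧ b.getD i ' ' = a.getD j ' ' ∧ b.getD j ' ' = a.getD i ' ' ∧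
        ∀ k, k < a.length → k ≠ i → k ≠ j → b.getD k ' ' = a.getD k ' ' := by
  have hi : i < a.length := lt_trans hij hj
  constructor
  · rintro rfl
    refine ⟨length_pvSwap a i j, ?_, ?_, ?_⟩
    · rw [getD_pvSwap a i j i hi, if_neg (Nat.ne_of_lt hij), if_pos rfl]
    · rw [getD_pvSwap a i j j hj, if_pos rfl]
    · intro k hk hki hkj
      rw [getD_pvSwap a i j k hk, if_neg hkj, if_neg hki]
  · rintro ⟨hlen, h1, h2, h3⟩
    apply List.ext_getElem (by rw [length_pvSwap, hlen])
    intro k hk1 hk2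
    have hk : k < a.length := by rwa [length_pvSwap] at hk1
    rw [← List.getD_eq_getElem _ ' ' hk1, ← List.getD_eq_getElem _ ' ' hk2,
        getD_pvSwap a i j k hk]
    by_cases hkj : k = j
    · subst hkj; rw [if_pos rfl]; exact h2.symm
    · by_cases hki : k = i
      · subst hki; rw [if_neg hkj, if_pos rfl]; exact h1.symm
      · rw [if_neg hkj, if_neg hki]; exact (h3 k hk hki hkj).symm

theorem A_iff (w1 w2 : String) :
    is_metathesis w1 w2 = true ↔
      ∃ i j, i < j ∧ j < w1.toList.length ∧ pvSwap w1.toList i j = w2.toList := by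
  simp only [is_metathesis, List.any_eq_true, List.mem_range, List.mem_range'_1, beq_iff_eq]
  constructor
  · rintro ⟨i, hi, j, ⟨hj1, hj2⟩, hs⟩
    exact ⟨i, j, by omega, by omega, hs⟩
  · rintro ⟨i, j, hij, hj, hs⟩
    exact ⟨i, by omega, j, ⟨by omega, by omega⟩, hs⟩

theorem mem_filter_range (a b : List Char) (n k : Nat) :
    k ∈ (List.range n).filter (fun i => a.getD i ' ' != b.getD i ' ') ↔
      k < n ∧ a.getD k ' ' ≠ b.getD k ' ' := by
  simp [List.mem_filter]

theorem not_nodup_iff (a : List Char) :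
    ¬ a.Nodup ↔ ∃ i j, i < j ∧ j < a.length ∧ a.getD i ' ' = a.getD j ' ' := by
  rw [List.Nodup, List.pairwise_iff_getElem]
  push_neg
  constructor
  · rintro ⟨i, j, hi, hj, hij, h⟩
    exact ⟨i, j, hij, hj, by rwa [List.getD_eq_getElem _ _ hi, List.getD_eq_getElem _ _ hj]⟩
  · rintro ⟨i, j, hij, hj, h⟩
    have hi : i < a.length := lt_trans hij hj
    exact ⟨i, j, hi, hj, hij, by rwa [List.getD_eq_getElem _ _ hi, List.getD_eq_getElem _ _ hj] at h⟩

theorem ofList_length_lt_iff (a : List Char) :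
    (PySem.Set.ofList a).length < a.length ↔ ¬ a.Nodup := by
  constructor
  · intro h hnd
    rw [PySem.Set.ofList_eq_self_of_nodup a hnd] at h
    omega
  · intro hnd
    have hle : (PySem.Set.ofList a).length ≤ a.length := PySem.Set.length_ofList_le a
    have h1 : (PySem.Set.ofList a).toFinset = a.toFinset := by
      ext x; simp [List.mem_toFinset, PySem.Set.mem_ofList]
    have h2 : (PySem.Set.ofList a).toFinset.card = (PySem.Set.ofList a).length :=
      List.toFinset_card_of_nodup (PySem.Set.nodup_ofList a)
    have h3 : a.toFinset.card ≤ a.length := List.toFinset_card_le a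
    have h4 : a.toFinset.card ≠ a.length := by
      intro h
      exact hnd ((Multiset.toFinset_card_eq_card_iff_nodup (m := (a : Multiset Char))).mp h)
    have h5 : (PySem.Set.ofList a).toFinset.card = a.toFinset.card := by rw [h1]
    omega

theorem is_metathesis_spec' (w1 w2 : String) : is_metathesis w1 w2 = is_metathesis_alt w1 w2 := by
  rw [Bool.eq_iff_iff, A_iff]
  by_cases hbig : w1.toList.length = w2.toList.length ∧ 2 ≤ w1.toList.length
  · obtain ⟨hlen, h2n⟩ := hbig
    have hc : (w1.toList.length != w2.toList.length || decide (w1.toList.length < 2)) = false := by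
      rw [hlen]
      simp only [bne_self_eq_false, Bool.false_or, decide_eq_false_iff_not, not_lt]
      exact hlen ▸ h2n
    rcases hd : (List.range w1.toList.length).filter
        (fun i => w1.toList.getD i ' ' != w2.toList.getD i ' ') with _ | ⟨i, _ | ⟨j, _ | ⟨k, rest⟩⟩⟩
    all_goals simp only [is_metathesis_alt, hc, Bool.false_eq_true, if_false, hd]
    · -- no differing position: w1 = w2; A succeeds iff some letter repeats
      have hall : ∀ m, m < w1.toList.length → w1.toList.getD m ' ' = w2.toList.getD m ' ' := by
        intro m hm
        by_contra hne
        have := (mem_filter_range w1.toList w2.toList w1.toList.length m).mpr ⟨hm, hne⟩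
        rw [hd] at this
        simp at this
      have hab : w1.toList = w2.toList := by
        apply List.ext_getElem hlen
        intro m hm1 hm2
        rw [← List.getD_eq_getElem _ ' ' hm1, ← List.getD_eq_getElem _ ' ' hm2]
        exact hall m hm1
      rw [decide_eq_true_iff, ofList_length_lt_iff, not_nodup_iff]
      constructor
      · rintro ⟨i, j, hij, hj, hs⟩
        rw [pvSwap_eq_iff _ _ _ _ hij hj] at hs
        refine ⟨i, j, hij, hj, ?_⟩
        rw [← hab] at hs
        exact hs.2.1
      · rintro ⟨i, j, hij, hj, he⟩
        refine ⟨i, j, hij, hj, ?_⟩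
        rw [pvSwap_eq_iff _ _ _ _ hij hj, ← hab]
        exact ⟨rfl, he, he.symm, fun k _ _ _ => rfl⟩
    · -- exactly one differing position: no swap can work
      have hdm := (mem_filter_range w1.toList w2.toList w1.toList.length i).mp (by rw [hd]; simp)
      have honly : ∀ m, m < w1.toList.length → w1.toList.getD m ' ' ≠ w2.toList.getD m ' ' → m = i := by
        intro m hm hne
        have := (mem_filter_range w1.toList w2.toList w1.toList.length m).mpr ⟨hm, hne⟩
        rw [hd] at this
        simpa using this
      simp only [iff_false]
      rintro ⟨p, q, hpq, hq, hs⟩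
      rw [pvSwap_eq_iff _ _ _ _ hpq hq] at hs
      obtain ⟨_, hcp, hcq, hout⟩ := hs
      by_cases hip : i = p
      · subst hip
        have hqne : q ≠ i := by omega
        have hqeq : w1.toList.getD q ' ' = w2.toList.getD q ' ' := by
          by_contra hne
          exact hqne (honly q hq hne)
        exact hdm.2 (by rw [← hcq, ← hqeq, hcp])
      · by_cases hiq : i = q
        · subst hiq
          have hpne : p ≠ i := by omega
          have hpeq : w1.toList.getD p ' ' = w2.toList.getD p ' ' := by
            by_contra hne
            exact hpne (honly p (lt_trans hpq hq) hne)
          exact hdm.2 (by rw [← hcp, ← hpeq, hcq])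
        · exact hdm.2 (hout i hdm.1 hip hiq).symm
    · -- exactly two differing positions i < j
      have hsorted : ((List.range w1.toList.length).filter
          (fun i => w1.toList.getD i ' ' != w2.toList.getD i ' ')).Pairwise (· < ·) :=
        List.Pairwise.filter _ (List.pairwise_lt_range)
      rw [hd] at hsorted
      have hij : i < j := (List.pairwise_cons.mp hsorted).1 j (by simp)
      have hdi := (mem_filter_range w1.toList w2.toList w1.toList.length i).mp (by rw [hd]; simp)
      have hdj := (mem_filter_range w1.toList w2.toList w1.toList.length j).mp (by rw [hd]; simp)
      have honly : ∀ m, m < w1.toList.length → w1.toList.getD m ' ' ≠ w2.toList.getD m ' ' →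
          m = i ∨ m = j := by
        intro m hm hne
        have := (mem_filter_range w1.toList w2.toList w1.toList.length m).mpr ⟨hm, hne⟩
        rw [hd] at this
        simpa using this
      rw [Bool.and_eq_true, beq_iff_eq, beq_iff_eq]
      constructor
      · rintro ⟨p, q, hpq, hq, hs⟩
        rw [pvSwap_eq_iff _ _ _ _ hpq hq] at hs
        obtain ⟨_, hcp, hcq, hout⟩ := hs
        have hi' : i = p ∨ i = q := by
          by_contra h
          push_neg at h
          exact hdi.2 (hout i hdi.1 h.1 h.2).symm
        have hj' : j = p ∨ j = q := by
          by_contra h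
          push_neg at h
          exact hdj.2 (hout j hdj.1 h.1 h.2).symm
        have hip : i = p := by omega
        have hjq : j = q := by omega
        subst hip; subst hjq
        exact ⟨hcq.symm, hcp.symm⟩
      · rintro ⟨e1, e2⟩
        refine ⟨i, j, hij, hdj.1, ?_⟩
        rw [pvSwap_eq_iff _ _ _ _ hij hdj.1]
        refine ⟨hlen.symm, e2.symm, e1.symm, ?_⟩
        intro m hm hmi hmj
        by_contra hne
        have := honly m hm (fun h => hne h.symm)
        omega
    · -- three or more differing positions: no swap can work
      have hsorted : ((List.range w1.toList.length).filter
          (fun i => w1.toList.getD i ' ' != w2.toList.getD i ' ')).Pairwise (· < ·) :=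
        List.Pairwise.filter _ (List.pairwise_lt_range)
      rw [hd] at hsorted
      have hij : i < j ∧ j < k :=
        ⟨(List.pairwise_cons.mp hsorted).1 j (by simp),
         (List.pairwise_cons.mp (List.pairwise_cons.mp hsorted).2).1 k (by simp)⟩
      have hmem : ∀ m, m ∈ ([i, j, k] : List Nat) →
          m < w1.toList.length ∧ w1.toList.getD m ' ' ≠ w2.toList.getD m ' ' := by
        intro m hm
        refine (mem_filter_range w1.toList w2.toList w1.toList.length m).mp ?_
        rw [hd]
        simp at hm
        rcases hm with h | h | h <;> simp [h]
      simp only [iff_false]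
      rintro ⟨p, q, hpq, hq, hs⟩
      rw [pvSwap_eq_iff _ _ _ _ hpq hq] at hs
      obtain ⟨_, hcp, hcq, hout⟩ := hs
      have hin : ∀ m, m ∈ ([i, j, k] : List Nat) → m = p ∨ m = q := by
        intro m hm
        obtain ⟨hm1, hm2⟩ := hmem m hm
        by_contra h
        push_neg at h
        exact hm2 (hout m hm1 h.1 h.2).symm
      have h1 := hin i (by simp)
      have h2 := hin j (by simp)
      have h3 := hin k (by simp)
      omega
  · have hc : (w1.toList.length != w2.toList.length || decide (w1.toList.length < 2)) = true := by
      simp only [Bool.or_eq_true, bne_iff_ne, decide_eq_true_iff]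
      omega
    simp only [is_metathesis_alt, hc, if_true, Bool.false_eq_true, iff_false]
    rintro ⟨i, j, hij, hj, hs⟩
    have hl : w2.toList.length = w1.toList.length := by rw [← hs, length_pvSwap]
    exact hbig ⟨hl.symm, by omega⟩

-- ===== VERDICT (by name: the statement is the Claim_ definition above) =====
theorem is_metathesis_spec : Claim_equal_is_metathesis := by
  intro w1 w2 _
  unfold Spec_is_metathesis
  exact is_metathesis_spec' w1 w2
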